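-- pv_equiv track=rewrite | github.com/zaneck/evolveRobots | neat/imgTools.py | blockBehavior
-- ===== SOURCE A (Python) =====
-- def blockBehavior(imgTest, img, x, y, blockSize=4):
--     res =[]
--
--     for beginX in range(0,x,blockSize):
--         for beginY in range(0,y,blockSize):
--             tmp=0
--             for i in range(beginX, beginX + blockSize):
--                 for j in range(beginY, beginY + blockSize):
--                     if imgTest[i][j]==1:
--                         tmp+=1
--             res.append(tmp)
--     return res
-- ===== SOURCE B (Python) =====
-- def blockBehavior(imgTest, img, x, y, blockSize=4):
--     nbx = len(range(0, x, blockSize))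
--     nby = len(range(0, y, blockSize))
--     res = [0] * (nbx * nby)
--     if not res:
--         return res
--     for i in range(nbx * blockSize):
--         for j in range(nby * blockSize):
--             if imgTest[i][j] == 1:
--                 res[(i // blockSize) * nby + j // blockSize] += 1
--     return res
-- ===== Notes on version B (the rewrite author's own statement) =====
-- stated objective: alternative
-- what changed: A gathers each block's count with four nested block-accumulation loops appending one total per block; B preallocates a flat zero histogram of ceil-block counts and makes a single scatter pass over the block-extended pixel grid, incrementing slot (i//blockSize)*nby + j//blockSize whenever a cell equals 1.
import Mathlib
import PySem

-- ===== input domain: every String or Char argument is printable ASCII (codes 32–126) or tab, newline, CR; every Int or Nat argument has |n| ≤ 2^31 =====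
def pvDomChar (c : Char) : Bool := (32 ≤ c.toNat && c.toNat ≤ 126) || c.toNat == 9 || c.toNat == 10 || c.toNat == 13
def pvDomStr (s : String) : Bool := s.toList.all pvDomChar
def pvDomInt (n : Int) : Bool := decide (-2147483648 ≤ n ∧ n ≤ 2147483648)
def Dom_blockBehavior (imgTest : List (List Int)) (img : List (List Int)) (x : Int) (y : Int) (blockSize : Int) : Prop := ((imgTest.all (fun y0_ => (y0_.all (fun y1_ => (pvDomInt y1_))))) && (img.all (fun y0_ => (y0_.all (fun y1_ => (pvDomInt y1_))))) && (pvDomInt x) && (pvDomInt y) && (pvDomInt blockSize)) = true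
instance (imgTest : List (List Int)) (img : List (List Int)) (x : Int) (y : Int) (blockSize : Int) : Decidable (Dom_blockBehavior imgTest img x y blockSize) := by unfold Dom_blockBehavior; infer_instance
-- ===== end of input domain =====

-- B replaces A's four nested block-accumulation loops by a preallocated flat zero histogram and a
-- single scatter pass over the block-extended pixel grid (alternative decomposition, same cost).

-- ===== PORT A =====
def blockBehavior (imgTest : List (List Int)) (img : List (List Int)) (x : Int) (y : Int) (blockSize : Int) : List Int :=
  (PySem.List.pyRange 0 x blockSize).foldl (fun res beginX =>
    (PySem.List.pyRange 0 y blockSize).foldl (fun res beginY =>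
      let tmp : Int := (PySem.List.pyRange beginX (beginX + blockSize) 1).foldl (fun tmp i =>
        (PySem.List.pyRange beginY (beginY + blockSize) 1).foldl (fun tmp j =>
          if PySem.List.pyGetD (PySem.List.pyGetD imgTest i []) j 0 == 1 then tmp + 1 else tmp) tmp) 0
      res ++ [tmp]) res) []

-- ===== PORT B =====
-- Python's res[k] += 1 only ever runs with 0 ≤ k < len(res) (the loops are nonempty only for
-- positive blockSize, where i, j ≥ 0 and i//blockSize < nbx, j//blockSize < nby), so
-- List.modify at k.toNat is exact there.
def blockBehavior_alt (imgTest : List (List Int)) (img : List (List Int)) (x : Int) (y : Int) (blockSize : Int) : List Int :=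
  let nbx : Nat := (PySem.List.pyRange 0 x blockSize).length
  let nby : Nat := (PySem.List.pyRange 0 y blockSize).length
  let res : List Int := List.replicate (nbx * nby) 0
  -- Python's `if not res: return res` early-out: res is empty exactly when nbx * nby = 0
  if nbx * nby = 0 then res else
  (PySem.List.pyRange 0 ((nbx : Int) * blockSize) 1).foldl (fun res i =>
    (PySem.List.pyRange 0 ((nby : Int) * blockSize) 1).foldl (fun res j =>
      if PySem.List.pyGetD (PySem.List.pyGetD imgTest i []) j 0 == 1 then
        res.modify (PySem.Int.floordiv i blockSize * (nby : Int) + PySem.Int.floordiv j blockSize).toNat (· + 1)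
      else res) res) res

-- ===== PRECONDITION & SPEC =====
-- rows/columns touched by A's block-extended ranges when 0 < blockSize: ceil(n/blockSize)*blockSize
def pvSpan (n b : Int) : Int := PySem.Int.floordiv (n + b - 1) b * b

-- Pre_ excludes exactly the inputs where the Python A raises: blockSize = 0 (ValueError from
-- range) and positive blockSize whose block-extended ranges index past the image (IndexError).
def Pre_blockBehavior (imgTest : List (List Int)) (img : List (List Int)) (x : Int) (y : Int) (blockSize : Int) : Prop :=
  if 0 < blockSize then
    (0 < x → 0 < y →
      pvSpan x blockSize ≤ (imgTest.length : Int) ∧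
      ∀ r ∈ imgTest.take (pvSpan x blockSize).toNat, pvSpan y blockSize ≤ (r.length : Int))
  else blockSize < 0
instance (imgTest : List (List Int)) (img : List (List Int)) (x : Int) (y : Int) (blockSize : Int) : Decidable (Pre_blockBehavior imgTest img x y blockSize) := by unfold Pre_blockBehavior; infer_instance

def pvWitness_blockBehavior : List (List Int) × List (List Int) × Int × Int × Int := ([[1, 0], [0, 1]], [], 2, 2, 2)

def Spec_blockBehavior (imgTest : List (List Int)) (img : List (List Int)) (x : Int) (y : Int) (blockSize : Int) (out : List Int) : Prop := out = blockBehavior_alt imgTest img x y blockSize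
instance (imgTest : List (List Int)) (img : List (List Int)) (x : Int) (y : Int) (blockSize : Int) (out : List Int) : Decidable (Spec_blockBehavior imgTest img x y blockSize out) := by unfold Spec_blockBehavior; infer_instance

-- ===== CLAIM (what is proved, stated in full; the proofs are below) =====
def Claim_equal_blockBehavior : Prop := ∀ (imgTest : List (List Int)) (img : List (List Int)) (x : Int) (y : Int) (blockSize : Int), Dom_blockBehavior imgTest img x y blockSize → Pre_blockBehavior imgTest img x y blockSize → Spec_blockBehavior imgTest img x y blockSize (blockBehavior imgTest img x y blockSize)

-- ===== LEMMAS AND PROOFS =====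

-- the 1-cell test both ports apply to a pixel
def pvCell (t : List (List Int)) (i j : Int) : Bool :=
  PySem.List.pyGetD (PySem.List.pyGetD t i []) j 0 == 1

-- number of 1-cells in row i restricted to column block q
def pvRowCnt (t : List (List Int)) (bs : Int) (q : Nat) (i : Int) : Nat :=
  (PySem.List.pyRange (bs * (q : Int)) (bs * ((q : Int) + 1)) 1).countP (fun j => pvCell t i j)

-- number of 1-cells of block (p, q)
def pvBlkN (t : List (List Int)) (bs : Int) (p q : Nat) : Nat :=
  ((PySem.List.pyRange (bs * (p : Int)) (bs * ((p : Int) + 1)) 1).map (fun i => pvRowCnt t bs q i)).sum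

-- the block-start range as the blocks-count range scaled by blockSize
theorem pv_starts (bs x : Int) (hbs : 0 < bs) :
    PySem.List.pyRange 0 x bs
      = (List.range (PySem.List.pyRange 0 x bs).length).map (fun (p : Nat) => bs * (p : Int)) := by
  rw [PySem.List.pyRange_of_pos 0 x hbs]
  simp only [List.length_map, List.length_range, zero_add]

-- [0, bs*N) splits into the N consecutive blocks of width bs
theorem pv_block_split (bs : Int) (hbs : 0 < bs) (N : Nat) :
    PySem.List.pyRange 0 (bs * (N : Int)) 1
      = (List.range N).flatMap (fun (p : Nat) => PySem.List.pyRange (bs * (p : Int)) (bs * ((p : Int) + 1)) 1) := by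
  induction N with
  | zero => simp [PySem.List.pyRange_one_eq_nil (le_refl 0)]
  | succ n ih =>
    rw [List.range_succ, List.flatMap_append, ← ih]
    have h1 : (0 : Int) ≤ bs * (n : Int) := by positivity
    have h2 : bs * (n : Int) ≤ bs * ((n : Int) + 1) := by nlinarith
    push_cast
    rw [PySem.List.pyRange_one_append 0 (bs * (n : Int)) (bs * ((n : Int) + 1)) h1 h2]
    simp

-- a conditional scatter pass reads position k as "initial value plus number of hits aimed at k"
theorem pv_scatter_get? {α : Type} (L : List α) (pb : α → Bool) (g : α → Nat) (r : List Int) (k : Nat) :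
    (L.foldl (fun r e => if pb e then r.modify (g e) (· + 1) else r) r)[k]?
      = r[k]?.map (· + (L.countP (fun e => pb e && (g e == k)) : Int)) := by
  induction L generalizing r with
  | nil => cases h : r[k]? <;> simp [h]
  | cons e L ih =>
    simp only [List.foldl_cons, List.countP_cons]
    rw [ih]
    by_cases hp : pb e
    · simp only [hp, if_true, List.getElem?_modify]
      by_cases hg : g e = k
      · subst hg
        cases h : r[g e]? with
        | none => simp [h]
        | some v =>
          simp [h, hp]
          try push_cast
          try ring
      · have hbeq : (g e == k) = false := by simp [hg]
        cases h : r[k]? with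
        | none => simp [h, hg]
        | some v => simp [h, hg, hbeq]
    · simp [hp]

-- a scatter pass over an empty histogram leaves it empty
theorem pv_scatter_nil {α : Type} (L : List α) (pb : α → Bool) (g : α → Nat) :
    L.foldl (fun r e => if pb e then r.modify (g e) (· + 1) else r) ([] : List Int) = [] := by
  induction L with
  | nil => rfl
  | cons e L ih =>
    simp only [List.foldl_cons]
    cases hp : pb e <;> simp [List.modify_nil, ih]

-- uniform-width flatMap of maps over ranges is a single range indexed by div/mod
theorem pv_flatMap_range_map (m n : Nat) (f : Nat → Nat → Int) :
    (List.range m).flatMap (fun p => (List.range n).map (fun q => f p q))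
      = (List.range (m * n)).map (fun k => f (k / n) (k % n)) := by
  rcases Nat.eq_zero_or_pos n with hn | hn
  · subst hn; simp
  · induction m with
    | zero => simp
    | succ a ih =>
      rw [List.range_succ, List.flatMap_append, ih, Nat.succ_mul, List.range_add, List.map_append]
      simp only [List.flatMap_cons, List.flatMap_nil, List.append_nil]
      congr 1
      rw [List.map_map]
      apply List.map_congr_left
      intro q hq
      rw [List.mem_range] at hq
      have h1 : (a * n + q) / n = a := by
        rw [mul_comm, Nat.mul_add_div hn, Nat.div_eq_of_lt hq, Nat.add_zero]
      have h2 : (a * n + q) % n = q := by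
        rw [mul_comm, Nat.mul_add_mod, Nat.mod_eq_of_lt hq]
      simp [Function.comp, h1, h2]

-- summing an indicator over range n picks the single hit
theorem pv_sum_ite (c : Nat → Nat) (q n : Nat) :
    q < n → ((List.range n).map (fun q' => if q' = q then c q' else 0)).sum = c q := by
  induction n with
  | zero => omega
  | succ m ih =>
    intro hq
    rw [List.range_succ, List.map_append, List.sum_append]
    by_cases h : q = m
    · subst h
      have hz : ((List.range q).map (fun q' => if q' = q then c q' else 0)).sum = 0 := by
        apply List.sum_eq_zero
        intro xv hx
        simp only [List.mem_map, List.mem_range] at hx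
        obtain ⟨q', hq', rfl⟩ := hx
        simp [Nat.ne_of_lt hq']
      simp [hz]
    · have hq' : q < m := by omega
      rw [ih hq']
      simp [Ne.symm h]

-- sums distribute over flatMap
theorem pv_sum_flatMap {α : Type} (l : List α) (f : α → List Nat) :
    (l.flatMap f).sum = (l.map (fun a => (f a).sum)).sum := by
  induction l with
  | nil => rfl
  | cons a l ih => simp [List.flatMap_cons, List.sum_append, ih]

-- row-major block coordinates are uniquely determined
theorem pv_pair_eq (NY p' q' p q : Nat) (h1 : q' < NY) (h2 : q < NY) :
    p' * NY + q' = p * NY + q ↔ p' = p ∧ q' = q := by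
  constructor
  · intro h
    have hNY : 0 < NY := by omega
    have e1 := congrArg (· / NY) h
    have e2 := congrArg (· % NY) h
    simp only [mul_comm _ NY] at e1 e2
    rw [Nat.mul_add_div hNY, Nat.mul_add_div hNY, Nat.div_eq_of_lt h1, Nat.div_eq_of_lt h2] at e1
    rw [Nat.mul_add_mod, Nat.mul_add_mod, Nat.mod_eq_of_lt h1, Nat.mod_eq_of_lt h2] at e2
    omega
  · rintro ⟨rfl, rfl⟩; rfl

-- the scatter count aimed at slot p*NY+q over the whole extended grid is block (p,q)'s count
theorem pv_count_eq (t : List (List Int)) (bs : Int) (hbs : 0 < bs) (NX NY p q : Nat)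
    (hp : p < NX) (hq : q < NY) :
    ((PySem.List.pyRange 0 (bs * (NX : Int)) 1).flatMap
        (fun i => (PySem.List.pyRange 0 (bs * (NY : Int)) 1).map (fun j => (i, j)))).countP
      (fun e => pvCell t e.1 e.2
        && ((PySem.Int.floordiv e.1 bs * (NY : Int) + PySem.Int.floordiv e.2 bs).toNat == p * NY + q))
      = pvBlkN t bs p q := by
  rw [List.countP_flatMap]
  simp only [Function.comp_def, List.countP_map]
  rw [pv_block_split bs hbs NX, List.map_flatMap, pv_sum_flatMap]
  have hrow : ∀ p' ∈ List.range NX,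
      ((PySem.List.pyRange (bs * (p' : Int)) (bs * ((p' : Int) + 1)) 1).map
        (fun i => (PySem.List.pyRange 0 (bs * (NY : Int)) 1).countP
          (fun j => pvCell t i j
            && ((PySem.Int.floordiv i bs * (NY : Int) + PySem.Int.floordiv j bs).toNat == p * NY + q)))).sum
      = if p' = p then pvBlkN t bs p q else 0 := by
    intro p' hp'
    have hcell : ∀ i ∈ PySem.List.pyRange (bs * (p' : Int)) (bs * ((p' : Int) + 1)) 1,
        (PySem.List.pyRange 0 (bs * (NY : Int)) 1).countP
          (fun j => pvCell t i j
            && ((PySem.Int.floordiv i bs * (NY : Int) + PySem.Int.floordiv j bs).toNat == p * NY + q))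
        = if p' = p then pvRowCnt t bs q i else 0 := by
      intro i hi
      rw [PySem.List.mem_pyRange_one] at hi
      have hfi : PySem.Int.floordiv i bs = (p' : Int) := by
        rw [PySem.Int.floordiv_eq_iff_of_pos hbs]
        constructor <;> nlinarith [hi.1, hi.2]
      rw [pv_block_split bs hbs NY, List.countP_flatMap]
      have hj : ∀ q' ∈ List.range NY,
          (List.countP (fun j => pvCell t i j
              && ((PySem.Int.floordiv i bs * (NY : Int) + PySem.Int.floordiv j bs).toNat == p * NY + q)) ∘
            (fun q' : Nat => PySem.List.pyRange (bs * (q' : Int)) (bs * ((q' : Int) + 1)) 1)) q'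
          = if q' = q ∧ p' = p then pvRowCnt t bs q i else 0 := by
        intro q' hq'
        rw [List.mem_range] at hq'
        simp only [Function.comp_def]
        have hpred : ∀ j ∈ PySem.List.pyRange (bs * (q' : Int)) (bs * ((q' : Int) + 1)) 1,
            (pvCell t i j
              && ((PySem.Int.floordiv i bs * (NY : Int) + PySem.Int.floordiv j bs).toNat == p * NY + q))
            = (if q' = q ∧ p' = p then pvCell t i j else false) := by
          intro j hjm
          rw [PySem.List.mem_pyRange_one] at hjm
          have hfj : PySem.Int.floordiv j bs = (q' : Int) := by
            rw [PySem.Int.floordiv_eq_iff_of_pos hbs]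
            constructor <;> nlinarith [hjm.1, hjm.2]
          rw [hfi, hfj]
          have htn : ((p' : Int) * (NY : Int) + (q' : Int)).toNat = p' * NY + q' := by
            have hc : ((p' * NY + q' : Nat) : Int) = (p' : Int) * (NY : Int) + (q' : Int) := by push_cast; ring
            rw [← hc, Int.toNat_natCast]
          rw [htn]
          by_cases hpq : p' = p ∧ q' = q
          · obtain ⟨rfl, rfl⟩ := hpq
            simp
          · have hne : p' * NY + q' ≠ p * NY + q := by
              intro hcontra
              exact hpq ((pv_pair_eq NY p' q' p q hq' hq).mp hcontra)
            have hbeq : (p' * NY + q' == p * NY + q) = false := by simp [hne]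
            have : ¬ (q' = q ∧ p' = p) := fun ⟨h1, h2⟩ => hpq ⟨h2, h1⟩
            simp [hbeq, this]
        rw [List.countP_congr (by intro xj hxj; rw [hpred xj hxj])]
        by_cases hcase : q' = q ∧ p' = p
        · obtain ⟨rfl, hpp⟩ := hcase
          simp only [hpp, and_self, if_true]
          rfl
        · simp only [hcase, if_false]
          rw [List.countP_congr (q := fun _ => false) (by intro xj hxj; simp [hcase])]
          simp
      rw [List.map_congr_left hj]
      by_cases hpp : p' = p
      · simp only [hpp, and_true]
        exact pv_sum_ite (fun _ => pvRowCnt t bs q i) q NY hq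
      · simp only [hpp, and_false, if_false]
        apply List.sum_eq_zero
        intro xv hx
        simp only [List.mem_map] at hx
        obtain ⟨q', _, rfl⟩ := hx
        rfl
    rw [List.map_congr_left hcell]
    by_cases hpp : p' = p
    · subst hpp
      simp only [if_pos rfl]
      rfl
    · simp only [hpp, if_false]
      apply List.sum_eq_zero
      intro xv hx
      simp only [List.mem_map] at hx
      obtain ⟨i, _, rfl⟩ := hx
      rfl
  rw [List.map_congr_left hrow]
  exact pv_sum_ite (fun _ => pvBlkN t bs p q) p NX hp

-- A in normal form: the row-major list of per-block counts
theorem pv_A_eq (t img : List (List Int)) (x y bs : Int) (hbs : 0 < bs) :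
    blockBehavior t img x y bs
      = (List.range ((PySem.List.pyRange 0 x bs).length * (PySem.List.pyRange 0 y bs).length)).map
          (fun k => ((pvBlkN t bs (k / (PySem.List.pyRange 0 y bs).length)
                               (k % (PySem.List.pyRange 0 y bs).length) : Nat) : Int)) := by
  unfold blockBehavior
  simp only [PySem.List.foldl_append_singleton_eq_map, PySem.List.foldl_append_eq_flatMap,
    List.nil_append]
  simp only [PySem.List.foldl_if_add_one, PySem.List.foldl_add, zero_add]
  conv_lhs => rw [pv_starts bs x hbs, pv_starts bs y hbs]
  rw [List.flatMap_map]
  have hbody : ∀ p q : Nat,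
      ((PySem.List.pyRange (bs * (p : Int)) (bs * (p : Int) + bs) 1).map
        (fun i => ((PySem.List.pyRange (bs * (q : Int)) (bs * (q : Int) + bs) 1).countP
          (fun j => PySem.List.pyGetD (PySem.List.pyGetD t i []) j 0 == 1) : Int))).sum
      = ((pvBlkN t bs p q : Nat) : Int) := by
    intro p q
    rw [pvBlkN, Nat.cast_list_sum, List.map_map]
    have hb1 : bs * (p : Int) + bs = bs * ((p : Int) + 1) := by ring
    have hb2 : bs * (q : Int) + bs = bs * ((q : Int) + 1) := by ring
    rw [hb1]
    apply congrArg List.sum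
    apply List.map_congr_left
    intro i _
    simp [Function.comp, pvRowCnt, pvCell, hb2]
  rw [List.flatMap_congr
    (g := fun (p : Nat) => (List.range (PySem.List.pyRange 0 y bs).length).map
      (fun (q : Nat) => ((pvBlkN t bs p q : Nat) : Int)))
    (by
      intro p _
      rw [List.map_map]
      apply List.map_congr_left
      intro q _
      simp only [Function.comp_def]
      exact hbody p q)]
  rw [pv_flatMap_range_map]

-- for bs < 0 every block count is 0 and A is a flat list of zeros
theorem pv_flatMap_const_zero (l1 l2 : List Int) :
    l1.flatMap (fun _ => l2.map (fun _ => (0 : Int))) = List.replicate (l1.length * l2.length) 0 := by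
  induction l1 with
  | nil => simp
  | cons a l ih =>
    rw [List.flatMap_cons, ih, List.map_const', List.length_cons,
      show (l.length + 1) * l2.length = l2.length + l.length * l2.length by ring,
      List.replicate_add]

-- ===== VERDICT (by name: the statement is the Claim_ definition above) =====
theorem blockBehavior_spec : Claim_equal_blockBehavior := by
  intro t img x y bs _hdom hpre
  unfold Spec_blockBehavior
  unfold Pre_blockBehavior at hpre
  by_cases hbs : 0 < bs
  · -- positive blockSize: compare A's gather list with B's scatter histogram pointwise
    rw [pv_A_eq t img x y bs hbs]
    have hB : blockBehavior_alt t img x y bs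
        = ((PySem.List.pyRange 0 (((PySem.List.pyRange 0 x bs).length : Int) * bs) 1).flatMap
             (fun i => (PySem.List.pyRange 0 (((PySem.List.pyRange 0 y bs).length : Int) * bs) 1).map
               (fun j => (i, j)))).foldl
            (fun r e => if pvCell t e.1 e.2 then
                r.modify (PySem.Int.floordiv e.1 bs * ((PySem.List.pyRange 0 y bs).length : Int)
                  + PySem.Int.floordiv e.2 bs).toNat (· + 1)
              else r)
            (List.replicate ((PySem.List.pyRange 0 x bs).length * (PySem.List.pyRange 0 y bs).length) 0) := by
      simp only [blockBehavior_alt]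
      by_cases he : (PySem.List.pyRange 0 x bs).length * (PySem.List.pyRange 0 y bs).length = 0
      · rw [if_pos he, he, List.replicate_zero]
        exact (pv_scatter_nil _ _ _).symm
      · rw [if_neg he, List.foldl_flatMap]
        simp only [List.foldl_map]
        rfl
    rw [hB, mul_comm ((PySem.List.pyRange 0 x bs).length : Int) bs,
      mul_comm ((PySem.List.pyRange 0 y bs).length : Int) bs]
    apply List.ext_getElem?
    intro k
    rw [pv_scatter_get?]
    by_cases hk : k < (PySem.List.pyRange 0 x bs).length * (PySem.List.pyRange 0 y bs).length
    · have hNY : 0 < (PySem.List.pyRange 0 y bs).length := by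
        rcases Nat.eq_zero_or_pos (PySem.List.pyRange 0 y bs).length with h | h
        · rw [h, Nat.mul_zero] at hk; omega
        · exact h
      have hq : k % (PySem.List.pyRange 0 y bs).length < (PySem.List.pyRange 0 y bs).length :=
        Nat.mod_lt _ hNY
      have hp : k / (PySem.List.pyRange 0 y bs).length < (PySem.List.pyRange 0 x bs).length :=
        (Nat.div_lt_iff_lt_mul hNY).mpr hk
      rw [List.getElem?_map, List.getElem?_range hk,
        List.getElem?_replicate, if_pos hk]
      simp only [Option.map_some]
      congr 1
      rw [zero_add]
      conv_rhs => rw [show k = k / (PySem.List.pyRange 0 y bs).length * (PySem.List.pyRange 0 y bs).length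
        + k % (PySem.List.pyRange 0 y bs).length from (Nat.div_add_mod' k _).symm]
      rw [pv_count_eq t bs hbs _ _ _ _ hp hq]
    · rw [List.getElem?_map]
      have h1 : (List.range ((PySem.List.pyRange 0 x bs).length * (PySem.List.pyRange 0 y bs).length))[k]? = none := by
        simp [hk]
      have h2 : (List.replicate ((PySem.List.pyRange 0 x bs).length * (PySem.List.pyRange 0 y bs).length) (0 : Int))[k]? = none := by
        rw [List.getElem?_replicate, if_neg hk]
      rw [h1, h2]
      rfl
  · -- negative blockSize: A appends only zero counts, B's scatter loop is empty
    rw [if_neg hbs] at hpre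
    unfold blockBehavior
    simp only [PySem.List.foldl_append_singleton_eq_map, PySem.List.foldl_append_eq_flatMap,
      List.nil_append]
    have h0 : ∀ a : Int, PySem.List.pyRange a (a + bs) 1 = [] := fun a =>
      PySem.List.pyRange_one_eq_nil (show a + bs ≤ a by omega)
    simp only [h0, List.foldl_nil]
    rw [pv_flatMap_const_zero]
    simp only [blockBehavior_alt]
    have hx0 : PySem.List.pyRange 0 (((PySem.List.pyRange 0 x bs).length : Int) * bs) 1 = [] := by
      apply PySem.List.pyRange_one_eq_nil
      have hc : (0 : Int) ≤ ((PySem.List.pyRange 0 x bs).length : Int) := Nat.cast_nonneg _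
      nlinarith
    by_cases he : (PySem.List.pyRange 0 x bs).length * (PySem.List.pyRange 0 y bs).length = 0
    · rw [if_pos he]
    · rw [if_neg he]
      simp only [hx0, List.foldl_nil]
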